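-- pv_equiv track=rewrite | github.com/ginolatorilla/wordlesolver | data.py | letter_frequency_distribution
-- ===== SOURCE A (Python) =====
-- import string
-- from collections import Counter
-- from typing import Dict, Iterable, Iterator, List
--
-- def letter_frequency_distribution(iterable: Iterable[str], max_word_length: int) -> Dict[str, List[int]]:
--     counter = Counter((letter, position) for word in iterable for position, letter in enumerate(word))
--
--     distribution = {}  # type: Dict[str, List[int]]
--     for letter in string.ascii_lowercase:
--         distribution[letter] = [0] * max_word_length
--
--     for (letter, position), count in counter.items():
--         current = distribution[letter]
--         update = [0] * max_word_length
--         update[position] = count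
--         distribution[letter] = [i + j for i, j in zip(current, update)]
--
--     return distribution
-- ===== SOURCE B (Python) =====
-- import string
--
--
-- def letter_frequency_distribution(iterable, max_word_length):
--     # One direct accumulation pass: no Counter, no per-entry one-hot update lists.
--     distribution = {letter: [0] * max_word_length for letter in string.ascii_lowercase}
--     for word in iterable:
--         for position, letter in enumerate(word):
--             distribution[letter][position] += 1
--     return distribution
-- ===== Notes on version B (the rewrite author's own statement) =====
-- stated objective: simpler
-- what changed: Drops the Counter and A's per-entry one-hot-update-plus-zip-add scatter phase entirely: B initialises the per-letter zero lists and increments distribution[letter][position] in one direct accumulation pass over the words.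
import Mathlib
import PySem

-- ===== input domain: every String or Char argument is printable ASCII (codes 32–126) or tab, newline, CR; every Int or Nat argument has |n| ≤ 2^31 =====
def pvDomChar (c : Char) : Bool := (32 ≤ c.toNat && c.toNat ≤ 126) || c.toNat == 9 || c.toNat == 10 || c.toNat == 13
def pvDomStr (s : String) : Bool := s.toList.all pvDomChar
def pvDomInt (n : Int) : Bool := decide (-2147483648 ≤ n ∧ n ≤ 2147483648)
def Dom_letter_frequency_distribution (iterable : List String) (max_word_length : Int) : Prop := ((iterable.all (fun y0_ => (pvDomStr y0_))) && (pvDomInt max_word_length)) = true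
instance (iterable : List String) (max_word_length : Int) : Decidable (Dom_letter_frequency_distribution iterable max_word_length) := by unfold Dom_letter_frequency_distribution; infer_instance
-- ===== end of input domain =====

-- B replaces A's Counter-then-scatter two-phase aggregation by a direct letter-major
-- recount (per letter and position, count the words with that letter there); equivalence
-- is about the return value on the inputs where A returns (Pre_ below).

-- string.ascii_lowercase
def pvLetters : List Char :=
  ['a','b','c','d','e','f','g','h','i','j','k','l','m','n','o','p','q','r','s','t','u','v','w','x','y','z']

-- ===== PORT A =====
-- the (letter, position) stream fed to Counter:
-- ((letter, position) for word in iterable for position, letter in enumerate(word))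
def pvOccs (iterable : List String) : List (Char × Int) :=
  iterable.flatMap (fun word => (PySem.List.enumerate word.toList 0).map (fun pl => (pl.2, pl.1)))

-- distribution = {}; for letter in string.ascii_lowercase: distribution[letter] = [0] * max_word_length
def pvDist0 (max_word_length : Int) : PySem.Dict String (List Int) :=
  pvLetters.foldl (fun d c => d.insert (String.ofList [c]) (List.replicate max_word_length.toNat 0)) PySem.Dict.empty

def letter_frequency_distribution (iterable : List String) (max_word_length : Int) : List (String × List Int) :=
  -- counter = Counter(...); then
  -- for (letter, position), count in counter.items():
  --     current = distribution[letter]                (KeyError when absent: excluded by Pre_, getD default unreachable there)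
  --     update = [0] * max_word_length; update[position] = count
  --                                                    (IndexError when out of range: excluded by Pre_, set is then a no-op)
  --     distribution[letter] = [i + j for i, j in zip(current, update)]
  -- return distribution
  ((PySem.Dict.counter (pvOccs iterable)).items.foldl (fun d kc =>
      d.insert (String.ofList [kc.1.1])
        (List.zipWith (· + ·) (d.getD (String.ofList [kc.1.1]) [])
          ((List.replicate max_word_length.toNat 0).set kc.1.2.toNat kc.2))) (pvDist0 max_word_length)).items

-- ===== PORT B =====
def letter_frequency_distribution_alt (iterable : List String) (max_word_length : Int) : List (String × List Int) :=
  -- distribution = {letter: [0] * max_word_length for letter in string.ascii_lowercase}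
  -- for word in iterable:
  --     for position, letter in enumerate(word):
  --         distribution[letter][position] += 1   (read distribution[letter] — KeyError when absent —
  --             then read and write index position — IndexError when out of range; both excluded by Pre_,
  --             so the getD defaults and the out-of-range no-op set are unreachable there)
  -- return distribution
  (iterable.foldl (fun d word =>
      (PySem.List.enumerate word.toList 0).foldl (fun d pl =>
        d.insert (String.ofList [pl.2])
          ((d.getD (String.ofList [pl.2]) []).set pl.1.toNat
            ((d.getD (String.ofList [pl.2]) []).getD pl.1.toNat 0 + 1))) d)
    (PySem.Dict.ofList (pvLetters.map (fun letter => (String.ofList [letter], List.replicate max_word_length.toNat 0))))).items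

-- ===== PRECONDITION & SPEC =====
-- Pre_ excludes exactly the inputs where A raises: a word with a character outside 'a'..'z'
-- (KeyError) or a nonempty word longer than max_word_length (IndexError; an empty word never
-- produces a position, so it is fine even when max_word_length is negative).
def Pre_letter_frequency_distribution (iterable : List String) (max_word_length : Int) : Prop :=
  ∀ w ∈ iterable, (w.toList = [] ∨ (w.toList.length : Int) ≤ max_word_length) ∧ ∀ ch ∈ w.toList, ch ∈ pvLetters
instance (iterable : List String) (max_word_length : Int) : Decidable (Pre_letter_frequency_distribution iterable max_word_length) := by
  unfold Pre_letter_frequency_distribution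
  haveI : ∀ w : String, Decidable ((w.toList = [] ∨ (w.toList.length : Int) ≤ max_word_length) ∧ ∀ ch ∈ w.toList, ch ∈ pvLetters) :=
    fun w => instDecidableAnd (dq := List.decidableBAll _ w.toList)
  exact List.decidableBAll _ iterable

def pvWitness_letter_frequency_distribution : List String × Int := (["a"], 1)

def Spec_letter_frequency_distribution (iterable : List String) (max_word_length : Int) (out : List (String × List Int)) : Prop := out = letter_frequency_distribution_alt iterable max_word_length
instance (iterable : List String) (max_word_length : Int) (out : List (String × List Int)) : Decidable (Spec_letter_frequency_distribution iterable max_word_length out) := by unfold Spec_letter_frequency_distribution; infer_instance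

-- ===== CLAIM (what is proved, stated in full; the proofs are below) =====
def Claim_equal_letter_frequency_distribution : Prop := ∀ (iterable : List String) (max_word_length : Int), Dom_letter_frequency_distribution iterable max_word_length → Pre_letter_frequency_distribution iterable max_word_length → Spec_letter_frequency_distribution iterable max_word_length (letter_frequency_distribution iterable max_word_length)

-- ===== LEMMAS AND PROOFS =====

theorem pvKey_eq_iff (a b : Char) : (String.ofList [a] = String.ofList [b]) ↔ a = b := by
  constructor
  · intro h; have := congrArg String.toList h; simpa using this
  · intro h; rw [h]

-- getD after the initialisation loop
theorem pv_getD_init (l : List Char) (v : List Int) (d : PySem.Dict String (List Int)) (x : String) :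
    (l.foldl (fun d c => d.insert (String.ofList [c]) v) d).getD x []
      = if x ∈ l.map (fun c => String.ofList [c]) then v else d.getD x [] := by
  induction l generalizing d with
  | nil => simp
  | cons c rest ih =>
    simp only [List.foldl_cons, List.map_cons, List.mem_cons]
    rw [ih, PySem.Dict.getD_insert]
    by_cases hx : x ∈ rest.map (fun c => String.ofList [c]) <;> by_cases he : x = String.ofList [c] <;>
      simp [hx, he]

-- a fold of inserts whose keys are all already present keeps the key list
theorem pv_keys_preserved {β : Type} (L : List β) (key : β → String)
    (f : PySem.Dict String (List Int) → β → List Int) (d : PySem.Dict String (List Int))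
    (h : ∀ b ∈ L, key b ∈ d.keys) :
    (L.foldl (fun d b => d.insert (key b) (f d b)) d).keys = d.keys := by
  rw [PySem.Dict.keys_foldl_insert_key L key f d, PySem.Set.update_eq_append_filter]
  have hfil : List.filter (fun y => !(PySem.Set.contains d.keys y)) (PySem.Set.ofList (L.map key)) = [] := by
    rw [List.filter_eq_nil_iff]
    intro y hy
    obtain ⟨b, hb, rfl⟩ := List.mem_map.mp ((PySem.Set.mem_ofList _ _).mp hy)
    simp [PySem.Set.contains, h b hb]
  rw [hfil, List.append_nil]

-- getD after A's update loop, as a per-key fold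
theorem pv_getD_phase2 (N : Nat) (L : List ((Char × Int) × Int)) (d : PySem.Dict String (List Int)) (x : String) :
    (L.foldl (fun d kc =>
        d.insert (String.ofList [kc.1.1])
          (List.zipWith (· + ·) (d.getD (String.ofList [kc.1.1]) [])
            ((List.replicate N 0).set kc.1.2.toNat kc.2))) d).getD x []
      = L.foldl (fun cur kc =>
          if String.ofList [kc.1.1] = x then List.zipWith (· + ·) cur ((List.replicate N 0).set kc.1.2.toNat kc.2) else cur)
          (d.getD x []) := by
  induction L generalizing d with
  | nil => rfl
  | cons kc rest ih =>
    simp only [List.foldl_cons]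
    rw [ih, PySem.Dict.getD_insert]
    by_cases h : String.ofList [kc.1.1] = x
    · simp [h]
    · rw [if_neg (fun hh => h hh.symm), if_neg h]

-- A's per-key fold preserves length N
theorem pv_condfold_len (N : Nat) (c : Char) (L : List ((Char × Int) × Int)) (cur : List Int)
    (hcur : cur.length = N) :
    (L.foldl (fun cur kc =>
        if kc.1.1 = c then List.zipWith (· + ·) cur ((List.replicate N 0).set kc.1.2.toNat kc.2) else cur)
        cur).length = N := by
  induction L generalizing cur with
  | nil => exact hcur
  | cons kc rest ih =>
    simp only [List.foldl_cons]
    apply ih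
    by_cases h : kc.1.1 = c <;> simp [h, hcur]

-- element q of A's per-key fold
theorem pv_condfold_getElem (N : Nat) (c : Char) (q : Nat) (hq : q < N)
    (L : List ((Char × Int) × Int)) (cur : List Int) (hcur : cur.length = N)
    (hpos : ∀ kc ∈ L, 0 ≤ kc.1.2 ∧ kc.1.2 < (N : Int)) :
    (L.foldl (fun cur kc =>
        if kc.1.1 = c then List.zipWith (· + ·) cur ((List.replicate N 0).set kc.1.2.toNat kc.2) else cur)
        cur)[q]?
      = some (cur[q]'(by rw [hcur]; exact hq)
        + ((L.filter (fun kc => decide (kc.1 = (c, (q : Int))))).map (·.2)).sum) := by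
  induction L generalizing cur with
  | nil =>
    simp only [List.foldl_nil, List.filter_nil, List.map_nil, List.sum_nil, add_zero]
    exact List.getElem?_eq_getElem _
  | cons kc rest ih =>
    have hponce := hpos kc (by simp)
    have hrest : ∀ x ∈ rest, 0 ≤ x.1.2 ∧ x.1.2 < (N : Int) := fun x hx => hpos x (by simp [hx])
    simp only [List.foldl_cons, List.filter_cons]
    by_cases hc : kc.1.1 = c
    · have hcur' : (List.zipWith (· + ·) cur ((List.replicate N 0).set kc.1.2.toNat kc.2)).length = N := by
        simp [hcur]
      rw [if_pos hc, ih _ hcur' hrest]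
      refine congrArg some ?_
      have hzq : (List.zipWith (· + ·) cur ((List.replicate N 0).set kc.1.2.toNat kc.2))[q]'(by rw [hcur']; exact hq)
          = cur[q]'(by rw [hcur]; exact hq)
            + ((List.replicate N 0).set kc.1.2.toNat kc.2)[q]'(by simp; exact hq) :=
        List.getElem_zipWith
      rw [hzq]
      have hsetq : ((List.replicate N 0).set kc.1.2.toNat kc.2)[q]'(by simp; exact hq)
          = if kc.1.2 = (q : Int) then kc.2 else 0 := by
        rw [List.getElem_set]
        by_cases hp : kc.1.2 = (q : Int)
        · have hn : kc.1.2.toNat = q := by omega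
          rw [if_pos hn, if_pos hp]
        · have hn : kc.1.2.toNat ≠ q := by omega
          rw [if_neg hn, if_neg hp, List.getElem_replicate]
      rw [hsetq]
      by_cases hp : kc.1.2 = (q : Int)
      · have hpred : (decide (kc.1 = (c, (q : Int)))) = true := by
          simp [Prod.ext_iff, hc, hp]
        simp only [hpred, if_pos, List.map_cons, List.sum_cons, hp]
        ring
      · have hpred : (decide (kc.1 = (c, (q : Int)))) = false := by
          simp [Prod.ext_iff, hp]
        simp only [hpred, Bool.false_eq_true, if_false, if_neg hp]
        ring
    · have hpred : (decide (kc.1 = (c, (q : Int)))) = false := by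
        simp [Prod.ext_iff, hc]
      rw [if_neg hc, ih _ hcur hrest]
      refine congrArg some ?_
      simp only [hpred, Bool.false_eq_true, if_false]

-- filtering the counter's items for one key
theorem pv_sum_filter_counter (S : List (Char × Int)) (hS : S.Nodup) (xs : List (Char × Int)) (k : Char × Int) :
    (((S.map (fun k' => (k', (xs.count k' : Int)))).filter (fun kc => decide (kc.1 = k))).map (·.2)).sum
      = if k ∈ S then (xs.count k : Int) else 0 := by
  induction S with
  | nil => simp
  | cons a rest ih =>
    obtain ⟨ha, hrest⟩ := List.nodup_cons.mp hS
    simp only [List.map_cons, List.filter_cons, List.mem_cons]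
    by_cases hk : a = k
    · subst hk
      simp [List.sum_cons, ih hrest, ha]
    · simp only [decide_eq_true_eq, hk, if_false, ih hrest]
      simp [Ne.symm hk]

-- getD after B's accumulation loop, as a per-key fold
theorem pv_getD_bphase (L : List (Char × Int)) (d : PySem.Dict String (List Int)) (x : String) :
    (L.foldl (fun d kp =>
        d.insert (String.ofList [kp.1])
          ((d.getD (String.ofList [kp.1]) []).set kp.2.toNat
            ((d.getD (String.ofList [kp.1]) []).getD kp.2.toNat 0 + 1))) d).getD x []
      = L.foldl (fun cur kp =>
          if String.ofList [kp.1] = x then cur.set kp.2.toNat (cur.getD kp.2.toNat 0 + 1) else cur)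
          (d.getD x []) := by
  induction L generalizing d with
  | nil => rfl
  | cons kp rest ih =>
    simp only [List.foldl_cons]
    rw [ih, PySem.Dict.getD_insert]
    by_cases h : String.ofList [kp.1] = x
    · simp [h]
    · rw [if_neg (fun hh => h hh.symm), if_neg h]

-- B's per-key fold preserves the length
theorem pv_bcond_len (c : Char) (L : List (Char × Int)) (cur : List Int) :
    (L.foldl (fun cur kp => if kp.1 = c then cur.set kp.2.toNat (cur.getD kp.2.toNat 0 + 1) else cur)
        cur).length = cur.length := by
  induction L generalizing cur with
  | nil => rfl
  | cons kp rest ih =>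
    simp only [List.foldl_cons]
    rw [ih]
    by_cases h : kp.1 = c <;> simp [h]

-- element q of B's per-key fold counts the occurrences of (c, q)
theorem pv_bcond_getElem (N : Nat) (c : Char) (q : Nat) (hq : q < N)
    (L : List (Char × Int)) (cur : List Int) (hcur : cur.length = N)
    (hpos : ∀ kp ∈ L, 0 ≤ kp.2 ∧ kp.2 < (N : Int)) :
    (L.foldl (fun cur kp => if kp.1 = c then cur.set kp.2.toNat (cur.getD kp.2.toNat 0 + 1) else cur)
        cur)[q]?
      = some (cur[q]'(by rw [hcur]; exact hq) + (L.count (c, (q : Int)) : Int)) := by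
  induction L generalizing cur with
  | nil =>
    simp only [List.foldl_nil, List.count_nil, Int.natCast_zero, add_zero]
    exact List.getElem?_eq_getElem _
  | cons kp rest ih =>
    have hponce := hpos kp (by simp)
    have hrest : ∀ x ∈ rest, 0 ≤ x.2 ∧ x.2 < (N : Int) := fun x hx => hpos x (by simp [hx])
    simp only [List.foldl_cons, List.count_cons]
    by_cases hc : kp.1 = c
    · have hcur' : (cur.set kp.2.toNat (cur.getD kp.2.toNat 0 + 1)).length = N := by
        simp [hcur]
      rw [if_pos hc, ih _ hcur' hrest]
      refine congrArg some ?_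
      have hsq : (cur.set kp.2.toNat (cur.getD kp.2.toNat 0 + 1))[q]'(by rw [hcur']; exact hq)
          = if kp.2 = (q : Int) then cur[q]'(by rw [hcur]; exact hq) + 1 else cur[q]'(by rw [hcur]; exact hq) := by
        rw [List.getElem_set]
        by_cases hp : kp.2 = (q : Int)
        · have hn : kp.2.toNat = q := by omega
          rw [if_pos hn, if_pos hp, hn]
          rw [List.getD_eq_getElem?_getD, List.getElem?_eq_getElem (by rw [hcur]; exact hq)]
          rfl
        · have hn : kp.2.toNat ≠ q := by omega
          rw [if_neg hn, if_neg hp]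
      rw [hsq]
      by_cases hp : kp.2 = (q : Int)
      · have hbeq : (kp == (c, (q : Int))) = true := by
          simp [Prod.ext_iff, hc, hp]
        rw [if_pos hp]
        simp only [hbeq, if_pos]
        push_cast
        ring
      · have hbeq : (kp == (c, (q : Int))) = false := by
          simp [Prod.ext_iff, hp]
        rw [if_neg hp]
        simp only [hbeq, Bool.false_eq_true, if_false, add_zero]
    · have hbeq : (kp == (c, (q : Int))) = false := by
        simp [Prod.ext_iff, hc]
      rw [if_neg hc, ih _ hcur hrest]
      simp only [hbeq, Bool.false_eq_true, if_false, add_zero]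

-- every occurrence has a lowercase letter and a position in [0, max_word_length)
theorem pv_occs_mem (iterable : List String) (m : Int)
    (hpre : Pre_letter_frequency_distribution iterable m) :
    ∀ kp ∈ pvOccs iterable, kp.1 ∈ pvLetters ∧ 0 ≤ kp.2 ∧ kp.2 < m := by
  intro kp hkp
  obtain ⟨w, hw, hmem⟩ := List.mem_flatMap.mp hkp
  obtain ⟨p, hp, rfl⟩ := List.mem_map.mp hmem
  rw [PySem.List.mem_enumerate_iff] at hp
  obtain ⟨k, hk, rfl⟩ := hp
  obtain ⟨hlen, hch⟩ := hpre w hw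
  have hlen' : (w.toList.length : Int) ≤ m := by
    rcases hlen with h | h
    · rw [h] at hk; simp at hk
    · exact h
  refine ⟨hch _ (List.getElem_mem hk), by simp, ?_⟩
  simp only [zero_add]
  omega

theorem pv_main (iterable : List String) (m : Int)
    (hpre : Pre_letter_frequency_distribution iterable m) :
    letter_frequency_distribution iterable m = letter_frequency_distribution_alt iterable m := by
  unfold letter_frequency_distribution letter_frequency_distribution_alt
  have hitems : (PySem.Dict.counter (pvOccs iterable)).items
      = (PySem.Set.ofList (pvOccs iterable)).map (fun k => (k, ((pvOccs iterable).count k : Int))) :=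
    PySem.Dict.items_counter _
  have hND0 : (pvLetters.map (fun c => String.ofList [c])).Nodup := by decide
  have hkeys0 : (pvDist0 m).keys = pvLetters.map (fun c => String.ofList [c]) := by
    unfold pvDist0
    rw [PySem.Dict.keys_foldl_insert_key pvLetters (fun c => String.ofList [c])
      (fun _ _ => List.replicate m.toNat 0) PySem.Dict.empty]
    rw [PySem.Dict.keys_empty, PySem.Set.update_nil_left, PySem.Set.ofList_eq_self_of_nodup _ hND0]
  -- B's dict comprehension initialiser is the same dictionary as A's initialisation loop
  have hinitB : PySem.Dict.ofList (pvLetters.map (fun letter => (String.ofList [letter], List.replicate m.toNat 0)))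
      = pvDist0 m := by
    unfold pvDist0
    simp only [PySem.Dict.ofList, PySem.Dict.update, List.foldl_map]
  rw [hinitB]
  -- B's nested word/position loop is the fold over the occurrence stream
  have hB : (pvOccs iterable).foldl (fun d kp =>
        d.insert (String.ofList [kp.1])
          ((d.getD (String.ofList [kp.1]) []).set kp.2.toNat
            ((d.getD (String.ofList [kp.1]) []).getD kp.2.toNat 0 + 1))) (pvDist0 m)
      = iterable.foldl (fun d word =>
          (PySem.List.enumerate word.toList 0).foldl (fun d pl =>
            d.insert (String.ofList [pl.2])
              ((d.getD (String.ofList [pl.2]) []).set pl.1.toNat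
                ((d.getD (String.ofList [pl.2]) []).getD pl.1.toNat 0 + 1))) d) (pvDist0 m) := by
    unfold pvOccs
    rw [List.foldl_flatMap]
    simp only [List.foldl_map]
  rw [← hB]
  -- key facts
  have hkeymemA : ∀ kc ∈ (PySem.Dict.counter (pvOccs iterable)).items,
      String.ofList [kc.1.1] ∈ (pvDist0 m).keys := by
    intro kc hkc
    rw [hitems] at hkc
    obtain ⟨k, hkS, rfl⟩ := List.mem_map.mp hkc
    have hf := pv_occs_mem iterable m hpre k ((PySem.Set.mem_ofList _ _).mp hkS)
    rw [hkeys0]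
    exact List.mem_map.mpr ⟨k.1, hf.1, rfl⟩
  have hkeymemB : ∀ kp ∈ pvOccs iterable, String.ofList [kp.1] ∈ (pvDist0 m).keys := by
    intro kp hkp
    have hf := pv_occs_mem iterable m hpre kp hkp
    rw [hkeys0]
    exact List.mem_map.mpr ⟨kp.1, hf.1, rfl⟩
  have hkeysA := pv_keys_preserved (PySem.Dict.counter (pvOccs iterable)).items
      (fun kc => String.ofList [kc.1.1])
      (fun d kc => List.zipWith (· + ·) (d.getD (String.ofList [kc.1.1]) [])
        ((List.replicate m.toNat 0).set kc.1.2.toNat kc.2)) (pvDist0 m) hkeymemA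
  have hkeysB := pv_keys_preserved (pvOccs iterable)
      (fun kp => String.ofList [kp.1])
      (fun d kp => (d.getD (String.ofList [kp.1]) []).set kp.2.toNat
        ((d.getD (String.ofList [kp.1]) []).getD kp.2.toNat 0 + 1)) (pvDist0 m) hkeymemB
  have hndA : ((PySem.Dict.counter (pvOccs iterable)).items.foldl (fun d kc =>
      d.insert (String.ofList [kc.1.1])
        (List.zipWith (· + ·) (d.getD (String.ofList [kc.1.1]) [])
          ((List.replicate m.toNat 0).set kc.1.2.toNat kc.2))) (pvDist0 m)).keys.Nodup := by
    rw [hkeysA, hkeys0]; exact hND0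
  have hndB : ((pvOccs iterable).foldl (fun d kp =>
      d.insert (String.ofList [kp.1])
        ((d.getD (String.ofList [kp.1]) []).set kp.2.toNat
          ((d.getD (String.ofList [kp.1]) []).getD kp.2.toNat 0 + 1))) (pvDist0 m)).keys.Nodup := by
    rw [hkeysB, hkeys0]; exact hND0
  rw [PySem.Dict.items_eq_map_keys _ hndA [], PySem.Dict.items_eq_map_keys _ hndB []]
  rw [hkeysA, hkeysB, hkeys0, List.map_map, List.map_map]
  apply List.map_congr_left
  intro c hc
  simp only [Function.comp, Prod.mk.injEq]
  refine ⟨trivial, ?_⟩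
  rw [pv_getD_phase2 m.toNat _ (pvDist0 m) (String.ofList [c])]
  rw [pv_getD_bphase _ (pvDist0 m) (String.ofList [c])]
  have hinit : (pvDist0 m).getD (String.ofList [c]) [] = List.replicate m.toNat 0 := by
    unfold pvDist0
    rw [pv_getD_init, if_pos (List.mem_map.mpr ⟨c, hc, rfl⟩)]
  rw [hinit]
  have hfunA : (fun (cur : List Int) (kc : (Char × Int) × Int) =>
        if String.ofList [kc.1.1] = String.ofList [c]
        then List.zipWith (· + ·) cur ((List.replicate m.toNat 0).set kc.1.2.toNat kc.2) else cur)
      = (fun cur kc =>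
        if kc.1.1 = c
        then List.zipWith (· + ·) cur ((List.replicate m.toNat 0).set kc.1.2.toNat kc.2) else cur) := by
    funext cur kc
    by_cases h : kc.1.1 = c
    · rw [if_pos ((pvKey_eq_iff _ _).mpr h), if_pos h]
    · rw [if_neg (fun hh => h ((pvKey_eq_iff _ _).mp hh)), if_neg h]
  have hfunB : (fun (cur : List Int) (kp : Char × Int) =>
        if String.ofList [kp.1] = String.ofList [c]
        then cur.set kp.2.toNat (cur.getD kp.2.toNat 0 + 1) else cur)
      = (fun cur kp =>
        if kp.1 = c
        then cur.set kp.2.toNat (cur.getD kp.2.toNat 0 + 1) else cur) := by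
    funext cur kp
    by_cases h : kp.1 = c
    · rw [if_pos ((pvKey_eq_iff _ _).mpr h), if_pos h]
    · rw [if_neg (fun hh => h ((pvKey_eq_iff _ _).mp hh)), if_neg h]
  rw [hfunA, hfunB]
  have hposA : ∀ kc ∈ (PySem.Dict.counter (pvOccs iterable)).items,
      0 ≤ kc.1.2 ∧ kc.1.2 < ((m.toNat : Nat) : Int) := by
    intro kc hkc
    rw [hitems] at hkc
    obtain ⟨k, hkS, rfl⟩ := List.mem_map.mp hkc
    have hf := pv_occs_mem iterable m hpre k ((PySem.Set.mem_ofList _ _).mp hkS)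
    refine ⟨hf.2.1, ?_⟩
    show k.2 < ((m.toNat : Nat) : Int)
    omega
  have hposB : ∀ kp ∈ pvOccs iterable, 0 ≤ kp.2 ∧ kp.2 < ((m.toNat : Nat) : Int) := by
    intro kp hkp
    have hf := pv_occs_mem iterable m hpre kp hkp
    have h2 := hf.2.1
    have h3 := hf.2.2
    refine ⟨h2, by omega⟩
  apply List.ext_getElem
  · rw [pv_condfold_len m.toNat c _ (List.replicate m.toNat 0) List.length_replicate]
    rw [pv_bcond_len c _ (List.replicate m.toNat 0), List.length_replicate]
  · intro q h1 h2
    have hq : q < m.toNat := by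
      rw [pv_condfold_len m.toNat c _ (List.replicate m.toNat 0) List.length_replicate] at h1
      exact h1
    have hA := pv_condfold_getElem m.toNat c q hq _ (List.replicate m.toNat 0) List.length_replicate hposA
    have hBel := pv_bcond_getElem m.toNat c q hq _ (List.replicate m.toNat 0) List.length_replicate hposB
    rw [List.getElem?_eq_getElem h1] at hA
    rw [List.getElem?_eq_getElem h2] at hBel
    rw [Option.some.inj hA, Option.some.inj hBel]
    rw [List.getElem_replicate, hitems]
    rw [pv_sum_filter_counter _ (PySem.Set.nodup_ofList _) (pvOccs iterable) (c, (q : Int))]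
    have hcount : (if (c, (q : Int)) ∈ PySem.Set.ofList (pvOccs iterable)
          then ((pvOccs iterable).count (c, (q : Int)) : Int) else 0)
        = ((pvOccs iterable).count (c, (q : Int)) : Int) := by
      by_cases hmem : (c, (q : Int)) ∈ PySem.Set.ofList (pvOccs iterable)
      · rw [if_pos hmem]
      · rw [if_neg hmem,
          List.count_eq_zero_of_not_mem (fun hh => hmem ((PySem.Set.mem_ofList _ _).mpr hh))]
        simp
    rw [hcount]

-- ===== VERDICT (by name: the statement is the Claim_ definition above) =====
theorem letter_frequency_distribution_spec : Claim_equal_letter_frequency_distribution := by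
  intro it m _ hpre
  exact pv_main it m hpre
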